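-- pv_equiv track=rewrite | github.com/gabbo25-bit/cm | level7.py | solve_hyper_grids
-- ===== SOURCE A (Python) =====
-- import math
--
-- def solve_hyper_grids(input_data):
--     total_paths_sum = 0
--
--     # Dividiamo l'input in righe
--     lines = input_data.strip().split('\n')
--
--     for line in lines:
--         if not line.strip(): continue
--
--         # Leggiamo Righe (R) e Colonne (C)
--         r, c = map(int, line.split())
--
--         # Numero di passi necessari per muoversi tra le celle
--         # Se la griglia è R x C, i passi sono (R-1) e (C-1)
--         steps_down = r - 1
--         steps_right = c - 1
--         n = steps_down + steps_right
--         k = steps_down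
--
--         # Calcoliamo le combinazioni distinte: n! / (k! * (n-k)!)
--         paths = math.comb(n, k)
--         total_paths_sum += paths
--
--     return total_paths_sum
-- ===== SOURCE B (Python) =====
-- def _grid_paths(r, c):
--     # count monotone lattice paths across an r x c cell grid by dynamic programming:
--     # row[j] = number of paths reaching cell (i, j); each sweep adds the cell above.
--     if r < 1 or c < 1:
--         return 0
--     if c < r:
--         r, c = c, r          # keep the DP row along the shorter dimension
--     row = [1] * r
--     for _ in range(c - 1):
--         for j in range(1, r):
--             row[j] += row[j - 1]
--     return row[-1]
--
--
-- def solve_hyper_grids(input_data):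
--     grids = []
--     for line in input_data.strip().split('\n'):
--         tok = line.split()
--         if tok:
--             grids.append((int(tok[0]), int(tok[1])))
--     return sum(_grid_paths(r, c) for r, c in grids)
-- ===== Notes on version B (the rewrite author's own statement) =====
-- stated objective: alternative
-- what changed: B counts each grid's paths by the classic lattice-path dynamic programming (a 1-D row of path counts swept across the shorter dimension, additions only) instead of evaluating the closed-form binomial math.comb(n,k), and it is decomposed in two stages (parse all lines into (r,c) pairs, then sum over them) instead of A's single parse-and-accumulate loop.
import Mathlib
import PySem

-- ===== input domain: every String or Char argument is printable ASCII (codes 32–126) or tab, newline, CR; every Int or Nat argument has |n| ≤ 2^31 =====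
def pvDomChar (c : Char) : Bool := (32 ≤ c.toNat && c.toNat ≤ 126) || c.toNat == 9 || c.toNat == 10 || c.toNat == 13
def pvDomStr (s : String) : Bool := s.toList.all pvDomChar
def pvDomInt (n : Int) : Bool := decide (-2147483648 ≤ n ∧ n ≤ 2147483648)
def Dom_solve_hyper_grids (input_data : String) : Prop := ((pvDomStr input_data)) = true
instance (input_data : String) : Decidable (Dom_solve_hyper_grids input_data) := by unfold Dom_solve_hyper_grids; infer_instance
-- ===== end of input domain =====

-- B counts each grid's paths by the lattice-path dynamic programming (a row of counts
-- swept across the shorter dimension) instead of the closed-form binomial, and is staged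
-- as parse-all-lines-then-sum (objective: alternative; no speed claim).

-- ===== PORT A =====
def solve_hyper_grids (input_data : String) : Int :=
  ((PySem.Str.split? (PySem.Str.strip input_data) "\n").getD []).foldl
    (fun acc line =>
      if (PySem.Str.strip line).toList = [] then acc   -- 'if not line.strip(): continue'
      else
        match PySem.Str.split₀ line with
        | [rs, cs] =>
          match PySem.Int.ofStr? rs, PySem.Int.ofStr? cs with
          | some r, some c =>
            let steps_down := r - 1
            let steps_right := c - 1
            let n := steps_down + steps_right
            let k := steps_down
            -- math.comb(n, k); the guard totalizes its ValueError on negative arguments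
            if 0 ≤ n ∧ 0 ≤ k then acc + (Nat.choose n.toNat k.toNat : Int) else acc
          | _, _ => acc                                 -- int() ValueError (outside Pre_)
        | _ => acc)                                     -- unpack ValueError (outside Pre_)
    0

-- ===== PORT B =====
-- lattice-path DP of Source B's _grid_paths: row of counts, swept max-1 times
def gridPaths (r c : Int) : Int :=
  if r < 1 ∨ c < 1 then 0
  else
    let p := if c < r then (c, r) else (r, c)          -- 'if c < r: r, c = c, r'
    let r := p.1
    let c := p.2
    let row := List.replicate r.toNat (1 : Int)        -- 'row = [1] * r'
    let row := (PySem.List.pyRange 0 (c - 1) 1).foldl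
      (fun row _ =>
        (PySem.List.pyRange 1 r 1).foldl
          (fun row j =>                                -- 'row[j] += row[j-1]'
            PySem.List.pySetD row j
              (PySem.List.pyGetD row j 0 + PySem.List.pyGetD row (j - 1) 0))
          row)
      row
    (PySem.List.pyGet? row (-1)).getD 0                -- 'row[-1]'; row nonempty (r ≥ 1)

def solve_hyper_grids_alt (input_data : String) : Int :=
  let grids := ((PySem.Str.split? (PySem.Str.strip input_data) "\n").getD []).foldl
    (fun grids line =>
      let tok := PySem.Str.split₀ line
      if tok = [] then grids                           -- 'if tok:'
      else
        match PySem.Int.ofStr? (PySem.List.pyGetD tok 0 "") with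
        | some r =>
          match PySem.Int.ofStr? (PySem.List.pyGetD tok 1 "") with
          | some c => grids ++ [(r, c)]                -- 'grids.append((int(tok[0]), int(tok[1])))'
          | none => grids                              -- int() ValueError (outside Pre_)
        | none => grids                                -- int()/IndexError raise (outside Pre_)
    ) []
  (grids.map (fun p => gridPaths p.1 p.2)).sum         -- 'sum(_grid_paths(r, c) for r, c in grids)'

-- ===== PRECONDITION & SPEC =====
-- Pre_ admits exactly the inputs on which A returns: every line of the stripped input is
-- either whitespace-only or carries exactly two int-parsable tokens r c with r ≥ 1 and
-- r + c ≥ 2 (otherwise map/int/math.comb raises ValueError).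
def pvGoodLine (line : String) : Bool :=
  if (PySem.Str.strip line).toList = [] then PySem.Str.split₀ line == []
  else
    let parts := PySem.Str.split₀ line
    if parts.length = 2 then
      let r? := PySem.Int.ofStr? (PySem.List.pyGetD parts 0 "")
      let c? := PySem.Int.ofStr? (PySem.List.pyGetD parts 1 "")
      r?.isSome && c?.isSome && decide (1 ≤ r?.getD 0 ∧ 2 ≤ r?.getD 0 + c?.getD 0)
    else false

def Pre_solve_hyper_grids (input_data : String) : Prop :=
  ((PySem.Str.split? (PySem.Str.strip input_data) "\n").getD []).all pvGoodLine = true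

instance (input_data : String) : Decidable (Pre_solve_hyper_grids input_data) := by
  unfold Pre_solve_hyper_grids; infer_instance

def pvWitness_solve_hyper_grids : String := "2 3\n\n4 4"

def Spec_solve_hyper_grids (input_data : String) (out : Int) : Prop :=
  out = solve_hyper_grids_alt input_data
instance (input_data : String) (out : Int) : Decidable (Spec_solve_hyper_grids input_data out) := by
  unfold Spec_solve_hyper_grids; infer_instance

-- ===== CLAIM (what is proved, stated in full; the proofs are below) =====
def Claim_equal_solve_hyper_grids : Prop :=
  ∀ (input_data : String), Dom_solve_hyper_grids input_data →
    Pre_solve_hyper_grids input_data →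
    Spec_solve_hyper_grids input_data (solve_hyper_grids input_data)

-- ===== LEMMAS AND PROOFS =====

-- the DP row after t sweeps: row[j] = C(t+j, j)
def binomRow (t a : Nat) : List Int :=
  (List.range a).map (fun j => ((t + j).choose j : Int))

def pvUpd (row : List Int) (j : Int) : List Int :=
  PySem.List.pySetD row j
    (PySem.List.pyGetD row j 0 + PySem.List.pyGetD row (j - 1) 0)

-- DP row with entries 0..m already updated by the current sweep
def mixRow (t a m : Nat) : List Int :=
  (List.range a).map (fun j =>
    if j ≤ m then ((t + 1 + j).choose j : Int) else ((t + j).choose j : Int))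

theorem mixRow_zero (t a : Nat) : mixRow t a 0 = binomRow t a := by
  unfold mixRow binomRow
  apply List.map_congr_left
  intro j hj
  rcases Nat.eq_zero_or_pos j with h | h
  · subst h; simp
  · rw [if_neg (by omega)]

theorem mixRow_last (t a : Nat) (ha : 1 ≤ a) : mixRow t a (a - 1) = binomRow (t + 1) a := by
  unfold mixRow binomRow
  apply List.map_congr_left
  intro j hj
  rw [List.mem_range] at hj
  rw [if_pos (by omega)]

theorem binomRow_zero (a : Nat) : binomRow 0 a = List.replicate a (1 : Int) := by
  unfold binomRow
  apply List.ext_getElem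
  · simp
  · intro i h1 h2
    simp

theorem inner_inv (t a M : Nat) (hM : M < a) :
    (PySem.List.pyRange 1 ((M : Int) + 1) 1).foldl pvUpd (binomRow t a) = mixRow t a M := by
  induction M with
  | zero =>
    rw [show ((0:Nat):Int) + 1 = 1 by norm_num,
      PySem.List.pyRange_one_eq_nil (a := 1) (b := 1) (by norm_num)]
    rw [List.foldl_nil, ← mixRow_zero]
  | succ M ih =>
    have hM' : M < a := by omega
    have hsplit : PySem.List.pyRange 1 (((M : Int) + 1) + 1) 1
        = PySem.List.pyRange 1 ((M : Int) + 1) 1 ++ [(M : Int) + 1] := by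
      have := PySem.List.pyRange_one_succ_right (a := 1) (b := (M : Int) + 1) (by omega)
      simpa using this
    have hcast : (((M + 1 : Nat) : Int) + 1) = (((M : Int) + 1) + 1) := by push_cast; ring
    rw [hcast, hsplit, List.foldl_append, ih hM']
    rw [List.foldl_cons, List.foldl_nil]
    -- the single update at index M+1
    unfold pvUpd
    have hlen : (mixRow t a M).length = a := by unfold mixRow; simp
    have hget : ∀ (i : Nat), i < a → PySem.List.pyGetD (mixRow t a M) (i : Int) 0
        = (if i ≤ M then ((t + 1 + i).choose i : Int) else ((t + i).choose i : Int)) := by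
      intro i hi
      rw [PySem.List.pyGetD_eq_getElem _ _ (by omega) (by omega)]
      unfold mixRow
      simp
    have h2 : ((M : Int) + 1 - 1) = ((M : Nat) : Int) := by ring
    have h1 : ((M : Int) + 1) = ((M + 1 : Nat) : Int) := by push_cast; ring
    rw [PySem.List.pySetD_of_nonneg _ _ (by omega), h2, h1,
      hget (M + 1) (by omega), hget M hM']
    rw [if_neg (by omega), if_pos (le_refl M)]
    apply List.ext_getElem
    · simp [mixRow]
    · intro i hi1 hi2
      have hia : i < a := by
        have := hi2; unfold mixRow at this; simpa using this
      rw [List.getElem_set]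
      unfold mixRow
      simp only [List.getElem_map, List.getElem_range]
      have htn : ((M + 1 : Nat) : Int).toNat = M + 1 := by omega
      rw [htn]
      by_cases he : M + 1 = i
      · subst he
        rw [if_pos rfl, if_pos (le_refl (M+1))]
        have : (t + 1 + (M + 1)).choose (M + 1) = (t + (M + 1)).choose M + (t + (M + 1)).choose (M + 1) := by
          have := Nat.choose_succ_succ (t + M + 1) M
          simpa [Nat.add_assoc, Nat.add_comm, Nat.add_left_comm] using this
        rw [show t + 1 + M = t + (M + 1) by omega, this]
        push_cast; ring
      · rw [if_neg he]
        by_cases hle : i ≤ M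
        · rw [if_pos hle, if_pos (by omega)]
        · rw [if_neg hle, if_neg (by omega)]

theorem sweep_eq (t a : Nat) (ha : 1 ≤ a) :
    (PySem.List.pyRange 1 ((a : Nat) : Int) 1).foldl pvUpd (binomRow t a) = binomRow (t + 1) a := by
  have hcast : ((a : Nat) : Int) = ((a - 1 : Nat) : Int) + 1 := by omega
  rw [hcast, inner_inv t a (a - 1) (by omega), mixRow_last t a ha]

theorem outer_inv (a T : Nat) (ha : 1 ≤ a) :
    (PySem.List.pyRange 0 ((T : Nat) : Int) 1).foldl
      (fun row _ => (PySem.List.pyRange 1 ((a : Nat) : Int) 1).foldl pvUpd row)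
      (binomRow 0 a) = binomRow T a := by
  induction T with
  | zero =>
    rw [show ((0:Nat):Int) = 0 by norm_num,
      PySem.List.pyRange_one_eq_nil (a := 0) (b := 0) (le_refl 0), List.foldl_nil]
  | succ T ih =>
    have hsplit : PySem.List.pyRange 0 (((T : Int)) + 1) 1
        = PySem.List.pyRange 0 ((T : Int)) 1 ++ [(T : Int)] := by
      have := PySem.List.pyRange_one_succ_right (a := 0) (b := (T : Int)) (by omega)
      simpa using this
    have hcast : (((T + 1 : Nat)) : Int) = ((T : Int) + 1) := by push_cast; ring
    rw [hcast, hsplit, List.foldl_append, ih, List.foldl_cons, List.foldl_nil,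
      sweep_eq T a ha]

-- the whole DP equals the binomial row's last entry
theorem gridPaths_core (a b : Int) (ha : 1 ≤ a) (hab : a ≤ b) :
    (PySem.List.pyGet?
      ((PySem.List.pyRange 0 (b - 1) 1).foldl
        (fun row _ => (PySem.List.pyRange 1 a 1).foldl pvUpd row)
        (List.replicate a.toNat (1 : Int))) (-1)).getD 0
    = (((b - 1).toNat + (a.toNat - 1)).choose (a.toNat - 1) : Int) := by
  obtain ⟨aN, rfl⟩ : ∃ n : Nat, a = ((n : Nat) : Int) := ⟨a.toNat, by omega⟩
  obtain ⟨TN, hT⟩ : ∃ n : Nat, b - 1 = ((n : Nat) : Int) := ⟨(b - 1).toNat, by omega⟩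
  rw [hT, show ((aN : Int)).toNat = aN from by omega,
    show ((TN : Int)).toNat = TN from by omega,
    ← binomRow_zero aN, outer_inv aN TN (by omega)]
  rw [PySem.List.pyGet?_neg_one]
  unfold binomRow
  have hlen : ((List.range aN).map (fun j => ((TN + j).choose j : Int))).length = aN := by simp
  rw [List.getLast?_eq_getElem?, hlen]
  rw [List.getElem?_map, List.getElem?_range (by omega)]
  simp

-- the DP agrees with math.comb on A's admitted arguments
theorem gridPaths_eq_choose (r c : Int) (hr : 1 ≤ r) (hrc : 2 ≤ r + c) :
    gridPaths r c = ((r + c - 2).toNat.choose (r - 1).toNat : Int) := by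
  unfold gridPaths
  by_cases hc : c < 1
  · rw [if_pos (Or.inr hc)]
    rw [Nat.choose_eq_zero_of_lt (by omega)]
    simp
  · rw [if_neg (by omega)]
    have hfun : (fun (row : List Int) (j : Int) =>
        PySem.List.pySetD row j
          (PySem.List.pyGetD row j 0 + PySem.List.pyGetD row (j - 1) 0)) = pvUpd := rfl
    rw [hfun]
    by_cases hlt : c < r
    · rw [if_pos hlt]
      have := gridPaths_core c r (by omega) (by omega)
      simp only [] at this ⊢
      rw [this]
      have hk : (r - 1).toNat ≤ (r + c - 2).toNat := by omega
      have hsym := Nat.choose_symm hk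
      rw [show (r - 1).toNat + (c.toNat - 1) = (r + c - 2).toNat by omega,
        show c.toNat - 1 = (r + c - 2).toNat - (r - 1).toNat by omega, hsym]
    · rw [if_neg hlt]
      have := gridPaths_core r c (by omega) (by omega)
      simp only [] at this ⊢
      rw [this]
      rw [show (c - 1).toNat + (r.toNat - 1) = (r + c - 2).toNat by omega,
        show r.toNat - 1 = (r - 1).toNat by omega]

-- the (r, c) pair Source B's parsing stage collects from one line (empty if skipped)
def pvPairOf (line : String) : List (Int × Int) :=
  if PySem.Str.split₀ line = [] then []
  else
    match PySem.Int.ofStr? (PySem.List.pyGetD (PySem.Str.split₀ line) 0 ""),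
          PySem.Int.ofStr? (PySem.List.pyGetD (PySem.Str.split₀ line) 1 "") with
    | some r, some c => [(r, c)]
    | _, _ => []

-- B's per-line collecting step appends pvPairOf
theorem step_pair (line : String) (grids : List (Int × Int)) :
    (if PySem.Str.split₀ line = [] then grids
     else
       match PySem.Int.ofStr? (PySem.List.pyGetD (PySem.Str.split₀ line) 0 "") with
       | some r =>
         match PySem.Int.ofStr? (PySem.List.pyGetD (PySem.Str.split₀ line) 1 "") with
         | some c => grids ++ [(r, c)]
         | none => grids
       | none => grids)
    = grids ++ pvPairOf line := by
  unfold pvPairOf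
  by_cases h0 : PySem.Str.split₀ line = []
  · simp [h0]
  · rw [if_neg h0, if_neg h0]
    cases PySem.Int.ofStr? (PySem.List.pyGetD (PySem.Str.split₀ line) 0 "") with
    | none => simp
    | some r =>
      cases PySem.Int.ofStr? (PySem.List.pyGetD (PySem.Str.split₀ line) 1 "") with
      | none => simp
      | some c => simp

-- per-line agreement: A's accumulated step adds the collected pair's path count
theorem line_step (line : String) (hg : pvGoodLine line = true) (acc : Int) :
    (if (PySem.Str.strip line).toList = [] then acc
     else
       match PySem.Str.split₀ line with
       | [rs, cs] =>
         match PySem.Int.ofStr? rs, PySem.Int.ofStr? cs with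
         | some r, some c =>
           if 0 ≤ r - 1 + (c - 1) ∧ 0 ≤ r - 1 then
             acc + (Nat.choose (r - 1 + (c - 1)).toNat (r - 1).toNat : Int)
           else acc
         | _, _ => acc
       | _ => acc)
    = acc + ((pvPairOf line).map (fun p => gridPaths p.1 p.2)).sum := by
  unfold pvGoodLine at hg
  unfold pvPairOf
  by_cases hb : (PySem.Str.strip line).toList = []
  · rw [if_pos hb] at hg ⊢
    have hnil : PySem.Str.split₀ line = [] := by simpa using hg
    simp [hnil]
  · rw [if_neg hb] at hg ⊢
    simp only [] at hg ⊢
    by_cases hlen : (PySem.Str.split₀ line).length = 2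
    · obtain ⟨a, b, hab⟩ := List.length_eq_two.mp hlen
      rw [hab] at hlen hg ⊢
      rw [if_pos hlen] at hg
      rw [if_neg (by simp)]
      have h0 : PySem.List.pyGetD [a, b] 0 "" = a := by
        simp [PySem.List.pyGetD, PySem.List.pyGet?, PySem.List.pyIdx?]
      have h1 : PySem.List.pyGetD [a, b] 1 "" = b := by
        simp [PySem.List.pyGetD, PySem.List.pyGet?, PySem.List.pyIdx?]
      rw [h0, h1] at hg ⊢
      cases hr : PySem.Int.ofStr? a with
      | none => simp [hr] at hg
      | some r =>
        cases hc : PySem.Int.ofStr? b with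
        | none => simp [hr, hc] at hg
        | some c =>
          simp only [hr, hc, Option.isSome_some, Option.getD_some, Bool.true_and,
            decide_eq_true_eq] at hg
          simp only [hr, hc, List.map_cons, List.map_nil, List.sum_cons, List.sum_nil,
            add_zero]
          have hguard : (0 : Int) ≤ r - 1 + (c - 1) ∧ (0 : Int) ≤ r - 1 := by omega
          rw [if_pos hguard]
          congr 1
          rw [gridPaths_eq_choose r c hg.1 hg.2]
          congr 2
          omega
    · rw [if_neg hlen] at hg
      simp at hg

-- summing the path counts over the flattened pair list, line by line
theorem sum_flatMap_paths (ls : List String) :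
    ((ls.flatMap pvPairOf).map (fun p => gridPaths p.1 p.2)).sum
    = (ls.map (fun l => ((pvPairOf l).map (fun p => gridPaths p.1 p.2)).sum)).sum := by
  induction ls with
  | nil => simp
  | cons l ls ih => simp [List.flatMap_cons, ih]

-- A's whole fold in closed form: initial accumulator plus the per-line path counts
theorem A_fold (lines : List String) (h : ∀ x ∈ lines, pvGoodLine x = true) (acc : Int) :
    lines.foldl
      (fun acc line =>
        if (PySem.Str.strip line).toList = [] then acc
        else
          match PySem.Str.split₀ line with
          | [rs, cs] =>
            match PySem.Int.ofStr? rs, PySem.Int.ofStr? cs with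
            | some r, some c =>
              if 0 ≤ r - 1 + (c - 1) ∧ 0 ≤ r - 1 then
                acc + (Nat.choose (r - 1 + (c - 1)).toNat (r - 1).toNat : Int)
              else acc
            | _, _ => acc
          | _ => acc) acc
    = acc + (lines.map (fun l => ((pvPairOf l).map (fun p => gridPaths p.1 p.2)).sum)).sum := by
  induction lines generalizing acc with
  | nil => simp
  | cons l ls ih =>
    simp only [List.foldl_cons]
    have ih' := ih (h := fun x hx => h x (List.mem_cons_of_mem l hx))
    rw [ih',
      line_step l (h l List.mem_cons_self) acc, List.map_cons, List.sum_cons]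
    ring

-- B's collecting fold in closed form: initial list plus the collected pairs
theorem B_fold (lines : List String) (ps : List (Int × Int)) :
    lines.foldl
      (fun grids line =>
        if PySem.Str.split₀ line = [] then grids
        else
          match PySem.Int.ofStr? (PySem.List.pyGetD (PySem.Str.split₀ line) 0 "") with
          | some r =>
            match PySem.Int.ofStr? (PySem.List.pyGetD (PySem.Str.split₀ line) 1 "") with
            | some c => grids ++ [(r, c)]
            | none => grids
          | none => grids) ps
    = ps ++ lines.flatMap pvPairOf := by
  induction lines generalizing ps with
  | nil => simp
  | cons l ls ih =>
    simp only [List.foldl_cons]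
    rw [ih, step_pair l ps, List.flatMap_cons, List.append_assoc]

-- the two staged programs agree line list by line list
theorem fold_eq (lines : List String) (h : ∀ x ∈ lines, pvGoodLine x = true) :
    lines.foldl
      (fun acc line =>
        if (PySem.Str.strip line).toList = [] then acc
        else
          match PySem.Str.split₀ line with
          | [rs, cs] =>
            match PySem.Int.ofStr? rs, PySem.Int.ofStr? cs with
            | some r, some c =>
              if 0 ≤ r - 1 + (c - 1) ∧ 0 ≤ r - 1 then
                acc + (Nat.choose (r - 1 + (c - 1)).toNat (r - 1).toNat : Int)
              else acc
            | _, _ => acc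
          | _ => acc) 0
    = ((lines.foldl
        (fun grids line =>
          if PySem.Str.split₀ line = [] then grids
          else
            match PySem.Int.ofStr? (PySem.List.pyGetD (PySem.Str.split₀ line) 0 "") with
            | some r =>
              match PySem.Int.ofStr? (PySem.List.pyGetD (PySem.Str.split₀ line) 1 "") with
              | some c => grids ++ [(r, c)]
              | none => grids
            | none => grids) []).map (fun p => gridPaths p.1 p.2)).sum := by
  rw [A_fold lines h 0, B_fold lines [], List.nil_append, zero_add, sum_flatMap_paths]

-- ===== VERDICT (by name: the statement is the Claim_ definition above) =====
theorem solve_hyper_grids_spec : Claim_equal_solve_hyper_grids := by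
  intro input_data _hdom hpre
  unfold Spec_solve_hyper_grids
  simp only [solve_hyper_grids, solve_hyper_grids_alt]
  unfold Pre_solve_hyper_grids at hpre
  rw [List.all_eq_true] at hpre
  exact fold_eq _ hpre
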